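-- pv_equiv track=rewrite | github.com/vitorpy/ark-feanor | calculate_optimal_mult_table.py | mult_table_memory
-- ===== SOURCE A (Python) =====
-- from math import comb
--
-- def num_monomials(n, d):
--     """Calculate number of monomials for n variables at degree d."""
--     if d == 0:
--         return 1
--     return comb(n + d - 1, d)
--
-- def mult_table_memory(n, d1, d2):
--     """
--     Calculate total memory for multiplication table with max degrees (d1, d2).
--     Table structure: [lhs_deg][rhs_deg][lhs_index][rhs_index] -> u64
--     """
--     total_bytes = 0
--     for lhs_deg in range(d1 + 1):
--         for rhs_deg in range(d2 + 1):
--             count_lhs = num_monomials(n, lhs_deg)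
--             count_rhs = num_monomials(n, rhs_deg)
--             total_bytes += count_lhs * count_rhs * 8  # u64 = 8 bytes
--     return total_bytes
-- ===== SOURCE B (Python) =====
-- from math import comb
--
-- def num_monomials(n, d):
--     """Calculate number of monomials for n variables at degree d."""
--     if d == 0:
--         return 1
--     return comb(n + d - 1, d)
--
-- def mult_table_memory(n, d1, d2):
--     # Factor the double sum: 8 * (sum of lhs counts) * (sum of rhs counts).
--     # If either degree range is empty the product is 0.
--     if d1 < 0 or d2 < 0:
--         return 0
--     s_lhs = sum(num_monomials(n, d) for d in range(d1 + 1))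
--     s_rhs = sum(num_monomials(n, d) for d in range(d2 + 1))
--     return 8 * s_lhs * s_rhs
-- ===== Notes on version B (the rewrite author's own statement) =====
-- stated objective: faster
-- what changed: B factors A's double loop over degree pairs into two independent one-dimensional sums (returning 0 outright when either degree range is empty) and returns 8*S_lhs*S_rhs, replacing the O(d1*d2) nested loop by O(d1+d2) work.
import Mathlib
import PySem

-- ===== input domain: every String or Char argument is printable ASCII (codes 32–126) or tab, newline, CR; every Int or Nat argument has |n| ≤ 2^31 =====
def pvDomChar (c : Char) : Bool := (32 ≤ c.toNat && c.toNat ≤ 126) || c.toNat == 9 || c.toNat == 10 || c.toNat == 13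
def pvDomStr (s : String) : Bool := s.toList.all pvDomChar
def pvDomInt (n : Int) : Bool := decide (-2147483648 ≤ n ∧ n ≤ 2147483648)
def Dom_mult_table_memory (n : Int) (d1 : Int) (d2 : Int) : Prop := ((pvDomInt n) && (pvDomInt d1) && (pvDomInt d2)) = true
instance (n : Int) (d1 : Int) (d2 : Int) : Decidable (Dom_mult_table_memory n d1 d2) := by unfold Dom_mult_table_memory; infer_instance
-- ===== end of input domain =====

-- B replaces A's nested O(d1*d2) degree-pair loop by two one-dimensional sums and 8*S_lhs*S_rhs (asymptotically faster).

-- ===== PORT A =====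
-- math.comb(a, b) for the nonnegative arguments reached inside Pre_ (exact there; comb raises on negative
-- args, excluded by Pre_): the standard iterative product formula C(a,i+1) = C(a,i)*(a-i)/(i+1), each
-- division exact, yielding exactly binomial(a, b) (and 0 when b > a ≥ 0), as math.comb returns.
-- like math.comb it returns 0 outright for b > a and iterates only min(b, a-b) exact-division steps
def pyComb (a b : Int) : Int :=
  let n := a.toNat
  let k := b.toNat
  if n < k then 0
  else (((List.range (min k (n - k))).foldl (fun acc i => acc * (n - i) / (i + 1)) 1 : Nat) : Int)

def num_monomials (n : Int) (d : Int) : Int :=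
  if d = 0 then 1 else pyComb (n + d - 1) d

def mult_table_memory (n : Int) (d1 : Int) (d2 : Int) : Int :=
  (PySem.List.pyRange 0 (d1 + 1) 1).foldl (fun total_bytes lhs_deg =>
    (PySem.List.pyRange 0 (d2 + 1) 1).foldl (fun tb rhs_deg =>
      tb + num_monomials n lhs_deg * num_monomials n rhs_deg * 8) total_bytes) 0

-- ===== PORT B =====
def mult_table_memory_alt (n : Int) (d1 : Int) (d2 : Int) : Int :=
  if d1 < 0 || d2 < 0 then 0 else
  let s_lhs := ((PySem.List.pyRange 0 (d1 + 1) 1).map (fun d => num_monomials n d)).sum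
  let s_rhs := ((PySem.List.pyRange 0 (d2 + 1) 1).map (fun d => num_monomials n d)).sum
  8 * s_lhs * s_rhs

-- ===== PRECONDITION & SPEC =====
-- Pre_ excludes exactly the inputs where A raises ValueError: comb called with a negative argument,
-- i.e. n < 0 with some positive degree actually reached by the loops.
def Pre_mult_table_memory (n : Int) (d1 : Int) (d2 : Int) : Prop :=
  0 ≤ n ∨ d1 < 0 ∨ d2 < 0 ∨ (d1 = 0 ∧ d2 = 0)
instance (n : Int) (d1 : Int) (d2 : Int) : Decidable (Pre_mult_table_memory n d1 d2) := by
  unfold Pre_mult_table_memory; infer_instance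

def pvWitness_mult_table_memory : Int × Int × Int := (3, 2, 4)

def Spec_mult_table_memory (n : Int) (d1 : Int) (d2 : Int) (out : Int) : Prop := out = mult_table_memory_alt n d1 d2
instance (n : Int) (d1 : Int) (d2 : Int) (out : Int) : Decidable (Spec_mult_table_memory n d1 d2 out) := by unfold Spec_mult_table_memory; infer_instance

-- ===== CLAIM (what is proved, stated in full; the proofs are below) =====
def Claim_equal_mult_table_memory : Prop := ∀ (n : Int) (d1 : Int) (d2 : Int), Dom_mult_table_memory n d1 d2 → Pre_mult_table_memory n d1 d2 → Spec_mult_table_memory n d1 d2 (mult_table_memory n d1 d2)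

-- ===== LEMMAS AND PROOFS =====

-- pull a constant factor (and the literal 8) out of a mapped sum
theorem pv_sum_map_mul (L : List Int) (f : Int → Int) (c : Int) :
    (L.map (fun x => c * f x * 8)).sum = 8 * c * (L.map f).sum := by
  induction L with
  | nil => simp
  | cons a t ih => simp [ih]; ring

theorem pv_sum_map_mul_right (L : List Int) (f : Int → Int) (c : Int) :
    (L.map (fun x => 8 * f x * c)).sum = 8 * (L.map f).sum * c := by
  induction L with
  | nil => simp
  | cons a t ih => simp [ih]; ring

theorem pv_foldl_id (L : List Int) (a : Int) : L.foldl (fun tb _ => tb) a = a := by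
  induction L generalizing a with
  | nil => rfl
  | cons x t ih => exact ih a

-- ===== VERDICT (by name: the statement is the Claim_ definition above) =====
theorem mult_table_memory_spec : Claim_equal_mult_table_memory := by
  intro n d1 d2 _ _
  unfold Spec_mult_table_memory mult_table_memory mult_table_memory_alt
  by_cases h1 : d1 < 0
  · rw [PySem.List.pyRange_one_eq_nil (by omega : (d1 : Int) + 1 ≤ 0)]
    rw [if_pos (by simp [h1])]
    rfl
  · by_cases h2 : d2 < 0
    · rw [PySem.List.pyRange_one_eq_nil (by omega : (d2 : Int) + 1 ≤ 0)]
      rw [if_pos (by simp [h2])]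
      simp only [List.foldl_nil]
      exact pv_foldl_id _ _
    · rw [if_neg (by simp [h1, h2])]
      rw [PySem.List.foldl_congr_mem (g := fun total_bytes lhs_deg =>
        total_bytes + 8 * num_monomials n lhs_deg *
          ((PySem.List.pyRange 0 (d2 + 1) 1).map (fun d => num_monomials n d)).sum)]
      · rw [PySem.List.foldl_add, pv_sum_map_mul_right]
        ring
      · intro acc x _
        rw [PySem.List.foldl_add]
        congr 1
        exact pv_sum_map_mul _ _ _
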